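-- pv_equiv track=rewrite | github.com/ArthurBoaro/my-daily-coding-challenge-fcc | April 2, 2026.py | capitalize_fibonacci
-- ===== SOURCE A (Python) =====
-- def capitalize_fibonacci(s):
--
--     new_s = ""
--     fibonacci_arr = [0]
--     fibonacci = 0
--     n0 = 0
--     n1 = 1
--
--     for i in range(0, len(s)):
--         fibonacci = n1 + n0
--
--         if i in fibonacci_arr:
--             new_s += s[i].upper()
--         else:
--             new_s += s[i].lower()
--
--         fibonacci_arr.append(fibonacci)
--         n0 = n1
--         n1 = fibonacci
--
--     return new_s
-- ===== SOURCE B (Python) =====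
-- def capitalize_fibonacci(s):
--     # Lowercase everything in one pass, then walk the Fibonacci sequence itself
--     # and patch each Fibonacci position to uppercase: no membership test at all.
--     out = [c.lower() for c in s]
--     a, b = 0, 1
--     while a < len(s):
--         out[a] = s[a].upper()
--         a, b = b, a + b
--     return "".join(out)
-- ===== Notes on version B (the rewrite author's own statement) =====
-- stated objective: faster
-- what changed: A tests every index against a growing list of Fibonacci numbers (linear rescan per index); B never tests membership: it lowercases the whole string in one pass and then walks the Fibonacci sequence itself, directly overwriting the O(log n) Fibonacci positions with uppercase characters.
import Mathlib
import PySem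

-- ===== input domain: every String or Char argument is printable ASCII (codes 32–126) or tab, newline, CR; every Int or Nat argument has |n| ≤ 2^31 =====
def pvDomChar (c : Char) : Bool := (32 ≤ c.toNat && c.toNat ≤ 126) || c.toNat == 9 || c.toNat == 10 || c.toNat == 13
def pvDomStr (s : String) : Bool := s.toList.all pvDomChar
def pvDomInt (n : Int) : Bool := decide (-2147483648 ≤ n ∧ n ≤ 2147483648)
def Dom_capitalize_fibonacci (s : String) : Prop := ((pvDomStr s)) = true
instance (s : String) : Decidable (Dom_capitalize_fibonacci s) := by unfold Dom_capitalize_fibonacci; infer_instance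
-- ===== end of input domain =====

-- B replaces A's per-index membership scans by lowercasing everything in one pass and
-- then walking the Fibonacci sequence itself, overwriting those positions with uppercase.

-- ===== PORT A =====
-- state: (new_s, fibonacci_arr, fibonacci, n0, n1)
def pvStepA (cs : List Char) (st : List Char × List Int × Int × Int × Int) (i : Int) :
    List Char × List Int × Int × Int × Int :=
  let fib := st.2.2.2.2 + st.2.2.2.1
  let c := PySem.List.pyGetD cs i ' '
  let new_s := if i ∈ st.2.1 then st.1 ++ [PySem.Chars.upperChar c]
               else st.1 ++ [PySem.Chars.lowerChar c]
  (new_s, st.2.1 ++ [fib], fib, st.2.2.2.2, fib)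

def capitalize_fibonacci (s : String) : String :=
  let cs := s.toList
  String.ofList (((PySem.List.pyRange 0 (cs.length : Int) 1).foldl (pvStepA cs) ([], [0], 0, 0, 1)).1)

-- ===== PORT B =====
-- the while loop 'while a < len(s): out[a] = s[a].upper(); a, b = b, a + b'
-- (fuel n + 2 always suffices: Nat.fib (n + 2) ≥ n + 1, proved below in pv_fib_lb;
-- a, b stay nonnegative, so they are carried as Nat and out[a] = ... is List.set)
def pvPatchB (fuel : Nat) (cs : List Char) (out : List Char) (a b : Nat) : List Char :=
  match fuel with
  | 0 => out
  | f + 1 =>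
    if a < cs.length then
      pvPatchB f cs (out.set a (PySem.Chars.upperChar (cs.getD a ' '))) b (a + b)
    else out

def capitalize_fibonacci_alt (s : String) : String :=
  let cs := s.toList
  let out := cs.map PySem.Chars.lowerChar
  String.ofList (pvPatchB (cs.length + 2) cs out 0 1)

-- ===== PRECONDITION & SPEC =====
def Spec_capitalize_fibonacci (s : String) (out : String) : Prop := out = capitalize_fibonacci_alt s
instance (s : String) (out : String) : Decidable (Spec_capitalize_fibonacci s out) := by unfold Spec_capitalize_fibonacci; infer_instance

-- ===== CLAIM (what is proved, stated in full; the proofs are below) =====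
def Claim_equal_capitalize_fibonacci : Prop := ∀ (s : String), Dom_capitalize_fibonacci s → Spec_capitalize_fibonacci s (capitalize_fibonacci s)

-- ===== LEMMAS AND PROOFS =====

-- A's fibonacci_arr just before iteration k: [0] ++ [fib 2, fib 3, …, fib (k+1)]
def pvArrA (k : Nat) : List Int := 0 :: (List.range k).map (fun j => (Nat.fib (j + 2) : Int))

theorem pv_fib_lb (m : Nat) : m ≤ Nat.fib (m + 1) := by
  have := Nat.le_fib_add_one (m + 1); omega

-- membership in A's list at index k is exactly "k is a Fibonacci number"
theorem pv_memA (k : Nat) : ((k : Int) ∈ pvArrA k) ↔ ∃ m, Nat.fib m = k := by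
  simp only [pvArrA, List.mem_cons, List.mem_map, List.mem_range]
  constructor
  · rintro (h | ⟨j, _, hj⟩)
    · refine ⟨0, ?_⟩; rw [Nat.fib_zero]; omega
    · exact ⟨j + 2, by exact_mod_cast hj⟩
  · rintro ⟨m, hm⟩
    by_cases hk : k = 0
    · left; simp [hk]
    · right
      by_cases hm2 : 2 ≤ m
      · refine ⟨m - 2, ?_, ?_⟩
        · have h1 := pv_fib_lb (m - 1)
          rw [show m - 1 + 1 = m by omega] at h1
          omega
        · rw [show m - 2 + 2 = m by omega, hm]
      · rcases (by omega : m = 0 ∨ m = 1) with rfl | rfl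
        · rw [Nat.fib_zero] at hm; omega
        · rw [Nat.fib_one] at hm
          refine ⟨0, by omega, ?_⟩
          have h2 : Nat.fib (0 + 2) = 1 := rfl
          omega

-- the character A writes at index i
def pvRuleA (cs : List Char) (i : Nat) : Char :=
  if (i : Int) ∈ pvArrA i then PySem.Chars.upperChar (PySem.List.pyGetD cs (i : Int) ' ')
  else PySem.Chars.lowerChar (PySem.List.pyGetD cs (i : Int) ' ')

-- loop invariant for A's fold
theorem pv_invA (cs : List Char) (k : Nat) :
    (PySem.List.pyRange 0 (k : Int) 1).foldl (pvStepA cs) ([], [0], 0, 0, 1) =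
      ((List.range k).map (pvRuleA cs), pvArrA k,
        (if k = 0 then 0 else (Nat.fib (k + 1) : Int)),
        (Nat.fib k : Int), (Nat.fib (k + 1) : Int)) := by
  induction k with
  | zero =>
    rw [PySem.List.pyRange_one_eq_nil (by norm_num)]
    simp [pvArrA]
  | succ k ih =>
    have hsplit : PySem.List.pyRange 0 ((k + 1 : Nat) : Int) 1 =
        PySem.List.pyRange 0 (k : Int) 1 ++ [(k : Int)] := by
      push_cast
      exact PySem.List.pyRange_one_succ_right (by positivity)
    rw [hsplit, List.foldl_append, ih]
    simp only [List.foldl_cons, List.foldl_nil, pvStepA]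
    have hfib : (Nat.fib (k + 1) : Int) + (Nat.fib k : Int) = (Nat.fib (k + 2) : Int) := by
      rw [Nat.fib_add_two]; push_cast; ring
    have harr : pvArrA k ++ [(Nat.fib (k + 2) : Int)] = pvArrA (k + 1) := by
      simp [pvArrA, List.range_succ]
    have hmap : (List.range k).map (pvRuleA cs) ++
        [if (k : Int) ∈ pvArrA k then PySem.Chars.upperChar (PySem.List.pyGetD cs (k : Int) ' ')
         else PySem.Chars.lowerChar (PySem.List.pyGetD cs (k : Int) ' ')] =
        (List.range (k + 1)).map (pvRuleA cs) := by
      rw [List.range_succ, List.map_append]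
      simp [pvRuleA]
    simp only [Prod.mk.injEq]
    refine ⟨?_, ?_, ?_, ?_, ?_⟩
    · rw [← hmap]
      by_cases h : (k : Int) ∈ pvArrA k <;> simp [h]
    · rw [hfib]; exact harr
    · rw [if_neg (by omega : ¬(k + 1 = 0)), show k + 1 + 1 = k + 2 from rfl]
      exact hfib
    · trivial
    · rw [show k + 1 + 1 = k + 2 from rfl]; exact hfib

-- B's patch loop, started at the Fibonacci pair (fib j, fib (j+1)) with enough fuel,
-- sets exactly the positions that are Fibonacci numbers reachable from index j
theorem pv_patchB_getElem (fuel : Nat) : ∀ (j : Nat) (cs out : List Char) (i : Nat),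
    out.length = cs.length →
    cs.length ≤ Nat.fib (j + fuel) →
    ((∃ m, j ≤ m ∧ Nat.fib m = i ∧ i < cs.length) →
      (pvPatchB fuel cs out (Nat.fib j) (Nat.fib (j + 1)))[i]? =
        some (PySem.Chars.upperChar (cs.getD i ' '))) ∧
    ((¬ ∃ m, j ≤ m ∧ Nat.fib m = i ∧ i < cs.length) →
      (pvPatchB fuel cs out (Nat.fib j) (Nat.fib (j + 1)))[i]? = out[i]?) := by
  induction fuel with
  | zero =>
    intro j cs out i hlen hf
    rw [Nat.add_zero] at hf
    refine ⟨?_, fun _ => rfl⟩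
    rintro ⟨m, hjm, hfm, hin⟩
    have := Nat.fib_mono hjm
    exfalso; omega
  | succ f ih =>
    intro j cs out i hlen hf
    simp only [pvPatchB]
    by_cases hlt : Nat.fib j < cs.length
    · rw [if_pos hlt]
      have hpair : Nat.fib j + Nat.fib (j + 1) = Nat.fib (j + 1 + 1) := by
        rw [Nat.fib_add_two]
      have hrec := ih (j + 1) cs (out.set (Nat.fib j) (PySem.Chars.upperChar (cs.getD (Nat.fib j) ' '))) i
        (by simpa using hlen) (by rw [show j + 1 + f = j + (f + 1) by omega]; exact hf)
      rw [hpair]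
      constructor
      · rintro ⟨m, hjm, hfm, hin⟩
        by_cases hi : i = Nat.fib j
        · by_cases hc : ∃ m, j + 1 ≤ m ∧ Nat.fib m = i ∧ i < cs.length
          · exact hrec.1 hc
          · rw [hrec.2 hc]
            subst hi
            rw [List.getElem?_set_self (by omega)]
        · have hc : ∃ m, j + 1 ≤ m ∧ Nat.fib m = i ∧ i < cs.length := by
            rcases Nat.eq_or_lt_of_le hjm with rfl | hj1
            · exact absurd hfm.symm hi
            · exact ⟨m, by omega, hfm, hin⟩
          exact hrec.1 hc
      · intro hno
        have hc : ¬ ∃ m, j + 1 ≤ m ∧ Nat.fib m = i ∧ i < cs.length := by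
          rintro ⟨m, hm, h1, h2⟩; exact hno ⟨m, by omega, h1, h2⟩
        rw [hrec.2 hc]
        have hi : i ≠ Nat.fib j := by
          rintro rfl; exact hno ⟨j, le_refl j, rfl, hlt⟩
        rw [List.getElem?_set_ne (fun h => hi h.symm)]
    · rw [if_neg hlt]
      refine ⟨?_, fun _ => rfl⟩
      rintro ⟨m, hjm, hfm, hin⟩
      have := Nat.fib_mono hjm
      exfalso; omega

theorem pv_main (s : String) :
    capitalize_fibonacci s = capitalize_fibonacci_alt s := by
  simp only [capitalize_fibonacci, capitalize_fibonacci_alt]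
  rw [pv_invA s.toList s.toList.length]
  congr 1
  set cs := s.toList with hcs
  set n := cs.length with hn
  apply List.ext_getElem?
  intro i
  have hA : ((List.range n).map (pvRuleA cs))[i]? =
      if h : i < n then some (pvRuleA cs i) else none := by
    split
    · rw [List.getElem?_map, List.getElem?_range (by assumption)]; rfl
    · rw [List.getElem?_eq_none]; simpa using by omega
  have hfuel : n ≤ Nat.fib (0 + (n + 2)) := by
    have := pv_fib_lb (n + 1)
    rw [show 0 + (n + 2) = n + 1 + 1 by omega]
    omega
  have hB := pv_patchB_getElem (n + 2) 0 cs (cs.map PySem.Chars.lowerChar) i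
    (by simp) hfuel
  rw [show Nat.fib 0 = 0 from rfl, show Nat.fib (0 + 1) = 1 from rfl] at hB
  rw [hA]
  by_cases hi : i < n
  · rw [dif_pos hi]
    have hget : PySem.List.pyGetD cs (i : Int) ' ' = cs.getD i ' ' :=
      PySem.List.pyGetD_natCast cs i ' '
    have hcond : ((i : Int) ∈ pvArrA i) ↔ (∃ m, 0 ≤ m ∧ Nat.fib m = i ∧ i < n) := by
      rw [pv_memA i]
      constructor
      · rintro ⟨m, hm⟩; exact ⟨m, Nat.zero_le m, hm, hi⟩
      · rintro ⟨m, _, hm, _⟩; exact ⟨m, hm⟩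
    by_cases h : ∃ m, 0 ≤ m ∧ Nat.fib m = i ∧ i < n
    · rw [hB.1 h]
      simp only [pvRuleA, if_pos (hcond.mpr h), hget]
    · rw [hB.2 h]
      rw [List.getElem?_map]
      rw [List.getElem?_eq_getElem (by omega : i < cs.length)]
      simp only [pvRuleA, if_neg (fun hc => h (hcond.mp hc)), hget, Option.map_some]
      congr 1
      rw [List.getD_eq_getElem cs ' ' (by omega : i < cs.length)]
  · rw [dif_neg hi, hB.2 (by rintro ⟨m, _, _, h⟩; omega),
      List.getElem?_eq_none (by simp only [List.length_map]; omega)]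

-- ===== VERDICT (by name: the statement is the Claim_ definition above) =====
theorem capitalize_fibonacci_spec : Claim_equal_capitalize_fibonacci := by
  intro s _
  unfold Spec_capitalize_fibonacci
  exact pv_main s
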